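-- pv_equiv track=rewrite | github.com/rupeshmohanty/Competitive-programming-problems | Python/GeeksforGeeks/GFG Practice/maxMatrix.py | sqMatrix
-- ===== SOURCE A (Python) =====
-- def sqMatrix(A):
--     res = []
--
--     for i in range(len(A)):
--         temp = []
--         for j in range(len(A[i])-1):
--             if A[i][j] == 1 and A[i][j+1] == 1:
--                 temp.append([A[i][j],A[i][j+1]])
--             else:
--                 temp = []
--         res.append(temp)
--
--     return res
-- ===== SOURCE B (Python) =====
-- def sqMatrix(A):
--     res = []
--     for row in A:
--         s = len(row)
--         while s > 0 and row[s - 1] == 1: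
--             s -= 1
--         res.append([[row[j], row[j + 1]] for j in range(s, len(row) - 1)])
--     return res
-- ===== Notes on version B (the rewrite author's own statement) =====
-- stated objective: alternative
-- what changed: Replaces A's left-to-right reset-on-mismatch sweep (which rebuilds and discards pair lists) with a right-to-left scan locating the start of the trailing run of 1s, then a single suffix-only pass building the pairs.
import Mathlib
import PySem

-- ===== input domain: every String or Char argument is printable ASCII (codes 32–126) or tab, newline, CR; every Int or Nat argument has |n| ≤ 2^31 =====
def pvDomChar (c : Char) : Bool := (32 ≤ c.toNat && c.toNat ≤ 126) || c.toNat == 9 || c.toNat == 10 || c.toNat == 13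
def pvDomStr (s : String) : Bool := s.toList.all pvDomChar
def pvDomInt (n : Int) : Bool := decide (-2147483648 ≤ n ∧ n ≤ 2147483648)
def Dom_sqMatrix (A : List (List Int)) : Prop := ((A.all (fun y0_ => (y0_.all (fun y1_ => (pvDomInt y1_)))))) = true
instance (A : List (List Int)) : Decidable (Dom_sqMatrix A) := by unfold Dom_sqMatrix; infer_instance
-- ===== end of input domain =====

-- B replaces A's reset-on-mismatch sweep by a backward scan for the trailing 1-run plus a suffix-only build pass; alternative decomposition, same cost.

-- ===== PORT A =====
-- inner loop: for j in range(len(row)-1): append pair / reset temp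
def sqInnerA (row : List Int) : List (List Int) :=
  (List.range (row.length - 1)).foldl
    (fun temp j =>
      if row.getD j 0 = 1 ∧ row.getD (j + 1) 0 = 1 then
        temp ++ [[row.getD j 0, row.getD (j + 1) 0]]
      else [])
    []

def sqMatrix (A : List (List Int)) : List (List (List Int)) :=
  A.foldl (fun res row => res ++ [sqInnerA row]) []

-- ===== PORT B =====
-- while s > 0 and row[s-1] == 1: s -= 1
def sqScanB (row : List Int) : Nat → Nat
  | 0 => 0
  | s + 1 => if row.getD s 0 = 1 then sqScanB row s else s + 1

-- [[row[j], row[j+1]] for j in range(s, len(row)-1)]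
def sqInnerB (row : List Int) : List (List Int) :=
  let s := sqScanB row row.length
  (List.range' s (row.length - 1 - s)).map (fun j => [row.getD j 0, row.getD (j + 1) 0])

def sqMatrix_alt (A : List (List Int)) : List (List (List Int)) :=
  A.map sqInnerB

-- ===== PRECONDITION & SPEC =====
def Spec_sqMatrix (A : List (List Int)) (out : List (List (List Int))) : Prop := out = sqMatrix_alt A
instance (A : List (List Int)) (out : List (List (List Int))) : Decidable (Spec_sqMatrix A out) := by unfold Spec_sqMatrix; infer_instance

-- ===== CLAIM (what is proved, stated in full; the proofs are below) =====
def Claim_equal_sqMatrix : Prop := ∀ (A : List (List Int)), Dom_sqMatrix A → Spec_sqMatrix A (sqMatrix A)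

-- ===== LEMMAS AND PROOFS =====

-- reset point of A's inner loop after n steps
def sqRP (row : List Int) : Nat → Nat
  | 0 => 0
  | n + 1 => if row.getD n 0 = 1 ∧ row.getD (n + 1) 0 = 1 then sqRP row n else n + 1

theorem sqRP_le (row : List Int) (n : Nat) : sqRP row n ≤ n := by
  induction n with
  | zero => simp [sqRP]
  | succ m ih => unfold sqRP; split_ifs with h; exact Nat.le_trans ih (Nat.le_succ m); exact Nat.le_refl _

theorem sqScanB_le (row : List Int) (s : Nat) : sqScanB row s ≤ s := by
  induction s with
  | zero => simp [sqScanB]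
  | succ m ih => unfold sqScanB; split_ifs with h; exact Nat.le_trans ih (Nat.le_succ m); exact Nat.le_refl _

-- characterisation of A's inner loop: its state after n steps is the pairs from sqRP row n to n
theorem sqInnerA_char (row : List Int) (n : Nat) :
    (List.range n).foldl
      (fun temp j =>
        if row.getD j 0 = 1 ∧ row.getD (j + 1) 0 = 1 then
          temp ++ [[row.getD j 0, row.getD (j + 1) 0]]
        else [])
      []
    = (List.range' (sqRP row n) (n - sqRP row n)).map
        (fun j => [row.getD j 0, row.getD (j + 1) 0]) := by
  induction n with
  | zero => simp [sqRP]
  | succ m ih =>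
    rw [List.range_succ, List.foldl_append, ih, List.foldl_cons, List.foldl_nil]
    by_cases h : row.getD m 0 = 1 ∧ row.getD (m + 1) 0 = 1
    · have hrp : sqRP row (m + 1) = sqRP row m := by
        simp only [sqRP]; rw [if_pos h]
      have hle := sqRP_le row m
      have hcount : m + 1 - sqRP row (m + 1) = (m - sqRP row m) + 1 := by rw [hrp]; omega
      have hm : sqRP row m + 1 * (m - sqRP row m) = m := by omega
      rw [if_pos h, hcount, hrp, List.range'_concat, List.map_append, hm]
      simp
    · have hrp : sqRP row (m + 1) = m + 1 := by
        simp only [sqRP]; rw [if_neg h]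
      rw [if_neg h, hrp, Nat.sub_self, List.range'_zero, List.map_nil]

-- the reset point of A equals B's backward-scan start (clipped at n)
theorem sqRP_eq_min (row : List Int) (n : Nat) :
    sqRP row n = min (sqScanB row (n + 1)) n := by
  induction n with
  | zero =>
    simp [sqRP, sqScanB]
  | succ m ih =>
    by_cases h1 : row.getD (m + 1) 0 = 1
    · have hb : sqScanB row (m + 1 + 1) = sqScanB row (m + 1) := by
        simp only [sqScanB]; rw [if_pos h1]
      by_cases h0 : row.getD m 0 = 1
      · have hP : row.getD m 0 = 1 ∧ row.getD (m + 1) 0 = 1 := ⟨h0, h1⟩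
        have hrp : sqRP row (m + 1) = sqRP row m := by
          simp only [sqRP]; rw [if_pos hP]
        have hb2 : sqScanB row (m + 1) = sqScanB row m := by
          simp only [sqScanB]; rw [if_pos h0]
        have hle : sqScanB row m ≤ m := sqScanB_le row m
        rw [hrp, ih, hb, hb2]
        omega
      · have hP : ¬(row.getD m 0 = 1 ∧ row.getD (m + 1) 0 = 1) := fun hp => h0 hp.1
        have hrp : sqRP row (m + 1) = m + 1 := by
          simp only [sqRP]; rw [if_neg hP]
        have hb2 : sqScanB row (m + 1) = m + 1 := by
          simp only [sqScanB]; rw [if_neg h0]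
        rw [hrp, hb, hb2]; omega
    · have hP : ¬(row.getD m 0 = 1 ∧ row.getD (m + 1) 0 = 1) := fun hp => h1 hp.2
      have hrp : sqRP row (m + 1) = m + 1 := by
        simp only [sqRP]; rw [if_neg hP]
      have hb : sqScanB row (m + 1 + 1) = m + 1 + 1 := by
        simp only [sqScanB]; rw [if_neg h1]
      rw [hrp, hb]; omega

theorem sqInner_eq (row : List Int) : sqInnerA row = sqInnerB row := by
  unfold sqInnerA sqInnerB
  rw [sqInnerA_char]
  rcases row with _ | ⟨x, xs⟩
  · simp [sqRP, sqScanB]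
  · set L := (x :: xs).length with hL
    have hL1 : L - 1 + 1 = L := by simp [hL]
    have hrp := sqRP_eq_min (x :: xs) (L - 1)
    rw [hL1] at hrp
    set t := sqScanB (x :: xs) L with ht
    have htle : t ≤ L := sqScanB_le (x :: xs) L
    by_cases hc : t ≤ L - 1
    · rw [hrp, Nat.min_eq_left hc]
    · have h1 : L - 1 - sqRP (x :: xs) (L - 1) = 0 := by
        rw [hrp]; omega
      have h2 : L - 1 - t = 0 := by omega
      simp only [h1, h2, List.range'_zero, List.map_nil]

theorem sqMatrix_foldl (A : List (List Int)) (acc : List (List (List Int))) :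
    A.foldl (fun res row => res ++ [sqInnerA row]) acc = acc ++ A.map sqInnerA := by
  induction A generalizing acc with
  | nil => simp
  | cons r rs ih => simp [List.foldl_cons, ih]

-- ===== VERDICT (by name: the statement is the Claim_ definition above) =====
theorem sqMatrix_spec : Claim_equal_sqMatrix := by
  intro A _
  unfold Spec_sqMatrix sqMatrix sqMatrix_alt
  rw [sqMatrix_foldl]
  simp [sqInner_eq]
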